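-- pv_equiv track=rewrite | github.com/mardiros/casualcms | src/casualcms/adapters/uow_sqla/uow_sqla.py | build_parent_path
-- ===== SOURCE A (Python) =====
-- from typing import (
--     Any,
--     Callable,
--     Dict,
--     Iterator,
--     Mapping,
--     MutableMapping,
--     Optional,
--     Sequence,
--     Type,
--     cast,
-- )
--
-- def build_parent_path(path: str) -> Iterator[str]:
--     path = path.strip("/")
--     hostname, *slugs = path.split("/")
--
--     new_path = f"//{hostname}"
--     yield new_path
--     for slug in slugs:
--         new_path = f"{new_path}/{slug}"
--         yield new_path
-- ===== SOURCE B (Python) =====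
-- def build_parent_path(path):
--     s = "//" + path.strip("/")
--     for i in range(2, len(s)):
--         if s[i] == "/":
--             yield s[:i]
--     yield s
-- ===== Notes on version B (the rewrite author's own statement) =====
-- stated objective: alternative
-- what changed: B normalizes once to s = '//' + path.strip('/') and emits slices s[:i] at each '/' boundary index i >= 2 plus the full s, instead of splitting into hostname/slugs and re-concatenating an ever-growing prefix per slug.
import Mathlib
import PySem

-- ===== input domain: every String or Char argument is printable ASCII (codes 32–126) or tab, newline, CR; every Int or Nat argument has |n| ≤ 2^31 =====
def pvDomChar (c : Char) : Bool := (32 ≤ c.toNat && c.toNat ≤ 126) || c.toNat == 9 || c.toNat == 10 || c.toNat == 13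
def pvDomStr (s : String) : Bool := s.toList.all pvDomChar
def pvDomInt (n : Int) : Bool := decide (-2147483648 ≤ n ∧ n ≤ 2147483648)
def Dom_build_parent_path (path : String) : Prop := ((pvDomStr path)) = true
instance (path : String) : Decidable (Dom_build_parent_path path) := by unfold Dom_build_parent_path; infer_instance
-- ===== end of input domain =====

-- B builds the normalized string '//' + path.strip('/') once and yields its slices at '/' boundary
-- positions, instead of A's split-into-slugs and incremental re-concatenation (objective: alternative).
-- A is a generator; both sides are compared as the list of yielded values.

-- ===== PORT A =====
-- the 'for slug in slugs' loop of A, yielding each extended new_path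
def bpLoop (new_path : List Char) (slugs : List (List Char)) : List String :=
  match slugs with
  | [] => []
  | slug :: rest =>
      let np := new_path ++ '/' :: slug                     -- f"{new_path}/{slug}"
      String.ofList np :: bpLoop np rest

def build_parent_path (path : String) : List String :=
  let p := PySem.Chars.stripChars path.toList ['/']         -- path = path.strip("/")
  match PySem.Chars.splitOn p ['/'] with                    -- hostname, *slugs = path.split("/")
  | [] => []                                                -- unreachable: split never returns []
  | hostname :: slugs =>
      let new_path := ['/', '/'] ++ hostname                -- new_path = f"//{hostname}"
      String.ofList new_path :: bpLoop new_path slugs       -- yield new_path; then the loop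

-- ===== PORT B =====
def build_parent_path_alt (path : String) : List String :=
  let s := ['/', '/'] ++ PySem.Chars.stripChars path.toList ['/']   -- s = "//" + path.strip("/")
  ((PySem.List.pyRange 2 (s.length : Int) 1).foldl                  -- for i in range(2, len(s)):
      (fun acc i =>
        if PySem.List.pyGet? s i = some '/'                         --   if s[i] == "/":
        then acc ++ [String.ofList (PySem.List.slice s none (some i))]  --     yield s[:i]
        else acc) [])
    ++ [String.ofList s]                                            -- yield s

-- ===== PRECONDITION & SPEC =====
def Spec_build_parent_path (path : String) (out : List String) : Prop := out = build_parent_path_alt path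
instance (path : String) (out : List String) : Decidable (Spec_build_parent_path path out) := by unfold Spec_build_parent_path; infer_instance

-- ===== CLAIM (what is proved, stated in full; the proofs are below) =====
def Claim_equal_build_parent_path : Prop := ∀ (path : String), Dom_build_parent_path path → Spec_build_parent_path path (build_parent_path path)

-- ===== LEMMAS AND PROOFS =====

-- proof-side structural characterization of splitOn · ['/'] (single-char separator)
def mySplit (cur : List Char) : List Char → List (List Char)
  | [] => [cur]
  | c :: rest => if c = '/' then cur :: mySplit [] rest else mySplit (cur ++ [c]) rest

-- the common yield sequence: walk t emitting the accumulated prefix at each '/' and once at the end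
def bpPrefixes (p : List Char) : List Char → List String
  | [] => [String.ofList p]
  | c :: rest => (if c = '/' then [String.ofList p] else []) ++ bpPrefixes (p ++ [c]) rest

theorem splitOn_go_eq :
    ∀ (fuel : Nat) (l cur : List Char) (acc : List (List Char)), l.length < fuel →
      PySem.Chars.splitOn.go ['/'] fuel l cur acc = acc.reverse ++ mySplit cur.reverse l := by
  intro fuel
  induction fuel with
  | zero => intro l cur acc h; omega
  | succ n ih =>
    intro l cur acc h
    match l with
    | [] => simp [PySem.Chars.splitOn.go, mySplit]
    | c :: rest =>
      by_cases hc : c = '/'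
      · subst hc
        rw [PySem.Chars.splitOn.go, if_pos (by simp [List.isPrefixOf])]
        rw [ih _ _ _ (by simp at h ⊢; omega)]
        simp [mySplit]
      · rw [PySem.Chars.splitOn.go, if_neg (by simp [List.isPrefixOf]; exact fun hh => hc hh.symm)]
        rw [ih _ _ _ (by simp at h ⊢; omega)]
        simp [mySplit, hc]

theorem splitOn_eq_mySplit (t : List Char) : PySem.Chars.splitOn t ['/'] = mySplit [] t := by
  rw [PySem.Chars.splitOn, splitOn_go_eq _ _ _ _ (by omega)]
  simp

theorem mySplit_ne_nil (cur t : List Char) : mySplit cur t ≠ [] := by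
  induction t generalizing cur with
  | nil => simp [mySplit]
  | cons c rest ih =>
    by_cases hc : c = '/' <;> simp [mySplit, hc] <;> exact ih _

theorem bpLoop_mySplit (t : List Char) : ∀ (cur np : List Char),
    bpLoop np (mySplit cur t) = bpPrefixes (np ++ '/' :: cur) t := by
  induction t with
  | nil => intro cur np; simp [mySplit, bpLoop, bpPrefixes]
  | cons c rest ih =>
    intro cur np
    by_cases hc : c = '/'
    · subst hc
      simp only [mySplit, if_true]
      rw [show bpLoop np (cur :: mySplit [] rest) =
            String.ofList (np ++ '/' :: cur) :: bpLoop (np ++ '/' :: cur) (mySplit [] rest) from rfl,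
          ih]
      simp [bpPrefixes]
    · simp only [mySplit, if_neg hc]
      rw [ih]
      rw [show bpPrefixes (np ++ '/' :: cur) (c :: rest) =
            (if c = '/' then [String.ofList (np ++ '/' :: cur)] else []) ++
              bpPrefixes (np ++ '/' :: cur ++ [c]) rest from rfl]
      rw [if_neg hc]
      simp

theorem portA_eq_bpPrefixes (path : String) :
    build_parent_path path = bpPrefixes ['/', '/'] (PySem.Chars.stripChars path.toList ['/']) := by
  have h1 : build_parent_path path
      = bpLoop ['/'] (mySplit [] (PySem.Chars.stripChars path.toList ['/'])) := by
    unfold build_parent_path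
    dsimp only
    rw [splitOn_eq_mySplit]
    cases h : mySplit [] (PySem.Chars.stripChars path.toList ['/']) with
    | nil => exact absurd h (mySplit_ne_nil _ _)
    | cons hd tl => rfl
  rw [h1]
  simpa using bpLoop_mySplit (PySem.Chars.stripChars path.toList ['/']) [] ['/']

theorem portB_fold (s : List Char) : ∀ (n k : Nat) (acc : List String), k ≤ s.length → s.length - k = n →
    ((PySem.List.pyRange (k : Int) (s.length : Int) 1).foldl
      (fun acc i =>
        if PySem.List.pyGet? s i = some '/'
        then acc ++ [String.ofList (PySem.List.slice s none (some i))]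
        else acc) acc) ++ [String.ofList s]
      = acc ++ bpPrefixes (s.take k) (s.drop k) := by
  intro n
  induction n with
  | zero =>
    intro k acc hk hn
    have hk' : k = s.length := by omega
    subst hk'
    rw [PySem.List.pyRange_one_eq_nil (by omega)]
    simp [bpPrefixes]
  | succ m ih =>
    intro k acc hk hn
    have hlt : k < s.length := by omega
    rw [PySem.List.pyRange_one_cons (by exact_mod_cast hlt)]
    simp only [List.foldl_cons]
    have hget : PySem.List.pyGet? s (k : Int) = some s[k] := by
      simp [PySem.List.pyGet?, PySem.List.pyIdx?, hlt]
    have hslice : PySem.List.slice s none (some (k : Int)) = s.take k :=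
      PySem.List.slice_to_natCast s k
    have hdrop : s.drop k = s[k] :: s.drop (k + 1) := List.drop_eq_getElem_cons hlt
    have htake : s.take (k + 1) = s.take k ++ [s[k]] := by
      rw [List.take_add_one]; simp [hlt]
    have hcast : ((k : Int) + 1) = ((k + 1 : Nat) : Int) := by push_cast; ring
    rw [hget, hslice, hcast, hdrop]
    by_cases hc : s[k] = '/'
    · rw [if_pos (by rw [hc])]
      rw [ih (k + 1) _ (by omega) (by omega)]
      rw [show bpPrefixes (s.take k) (s[k] :: s.drop (k+1)) =
            (if s[k] = '/' then [String.ofList (s.take k)] else []) ++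
              bpPrefixes (s.take k ++ [s[k]]) (s.drop (k+1)) from rfl]
      rw [if_pos hc, ← htake]
      simp
    · rw [if_neg (by simp [hc])]
      rw [ih (k + 1) _ (by omega) (by omega)]
      rw [show bpPrefixes (s.take k) (s[k] :: s.drop (k+1)) =
            (if s[k] = '/' then [String.ofList (s.take k)] else []) ++
              bpPrefixes (s.take k ++ [s[k]]) (s.drop (k+1)) from rfl]
      rw [if_neg hc, ← htake]
      simp

-- ===== VERDICT (by name: the statement is the Claim_ definition above) =====
theorem build_parent_path_spec : Claim_equal_build_parent_path := by
  unfold Claim_equal_build_parent_path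
  intro path _
  unfold Spec_build_parent_path
  rw [portA_eq_bpPrefixes]
  unfold build_parent_path_alt
  dsimp only
  have hfold := portB_fold (['/','/'] ++ PySem.Chars.stripChars path.toList ['/'])
      (PySem.Chars.stripChars path.toList ['/']).length 2 [] (by simp) (by simp)
  norm_num at hfold
  exact hfold.symm
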